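-- pv_equiv track=rewrite | github.com/sjyk/deeplens-cv | dlcv/utils.py | labels_to_intervals
-- ===== SOURCE A (Python) =====
-- import itertools
--
-- def labels_to_intervals(labels_list):
--     """
--     labels_to_intervals() converts list of labels of each frame into set of time intervals where a tag occurs
--
--     Args:
--         labels_list: list of labels of each frame
--         e.g. [{'person'}, {'person'}, {'person'}, {'surfboard', 'person'}]
--
--     Returns:
--         tags - set of time intervals where a tag occurs:
--             { (label, start, end) }, a video from time 0 (inclusive) to time T (exclusive)
--             e.g. {('cat', 3, 9), ('dog', 5, 8), ('people', 0, 6)}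
--             e.g. {('cat', 0, 1), ('cat', 2, 4), ('cat', 6, 8), ('dog', 0, 3),
--                   ('dog', 6, 8), ('people', 0, 2), ('people', 4, 6)}
--
--     """
--
--     labels_dict = dict()
--     for frame, labels in enumerate(labels_list):
--         for label in labels:
--             if label in labels_dict:
--                 labels_dict[label].add(frame)
--             else:
--                 labels_dict[label] = {frame}
--
--     output = set()
--     for key, value in labels_dict.items():
--         frame_list = sorted(value)
--         for interval in [(t[0][1], t[-1][1]) for t in
--                          (tuple(g[1]) for g in itertools.groupby(enumerate(frame_list), lambda x: x[0]-x[1]))]: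
--             output.add((key, interval[0], interval[1]+1))
--     return output
-- ===== SOURCE B (Python) =====
-- def labels_to_intervals(labels_list):
--     # Single ordered pass: per label keep (closed intervals, open start, open prev);
--     # a gap closes the open interval immediately. No frame sets, no sorting, no groupby.
--     state = {}  # label -> [closed list of (start, end), open_start, open_prev]
--     for frame, labels in enumerate(labels_list):
--         for label in labels:
--             st = state.get(label)
--             if st is None:
--                 state[label] = [[], frame, frame]
--             elif frame == st[2]:
--                 pass  # duplicate label in the same frame
--             elif frame == st[2] + 1:
--                 st[2] = frame
--             else:
--                 st[0].append((st[1], st[2] + 1))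
--                 st[1] = frame
--                 st[2] = frame
--     out = set()
--     for label, (closed, start, prev) in state.items():
--         for s, e in closed:
--             out.add((label, s, e))
--         out.add((label, start, prev + 1))
--     return out
-- ===== Notes on version B (the rewrite author's own statement) =====
-- stated objective: alternative
-- what changed: B replaces A's two-phase pipeline (build per-label frame sets, then sort each and collapse runs with enumerate+itertools.groupby) by a single streaming pass that keeps, per label, its currently open interval and closes it the moment a gap appears, so intervals are formed during the pass and no frame collection, sort or groupby exists.
import Mathlib
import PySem

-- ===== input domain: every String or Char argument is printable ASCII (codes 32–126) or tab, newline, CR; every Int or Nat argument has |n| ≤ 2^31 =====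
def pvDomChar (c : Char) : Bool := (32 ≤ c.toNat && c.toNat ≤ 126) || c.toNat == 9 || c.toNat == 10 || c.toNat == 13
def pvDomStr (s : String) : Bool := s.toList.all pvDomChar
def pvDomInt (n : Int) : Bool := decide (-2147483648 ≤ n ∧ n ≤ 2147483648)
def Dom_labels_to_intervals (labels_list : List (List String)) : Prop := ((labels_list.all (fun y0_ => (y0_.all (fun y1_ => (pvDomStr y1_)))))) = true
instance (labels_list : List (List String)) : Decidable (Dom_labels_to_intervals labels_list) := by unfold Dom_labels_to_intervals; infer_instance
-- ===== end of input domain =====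

-- B replaces A's build-then-collapse pipeline (per-label frame sets, sorted, enumerate+groupby)
-- by a single streaming pass that keeps each label's open interval and closes it on a gap.

-- ===== PORT A =====
-- labels_dict loop: dict label -> set of frames
def pvBuildA (labels_list : List (List String)) : PySem.Dict String (PySem.Set Int) :=
  (PySem.List.enumerate labels_list 0).foldl
    (fun d fl =>
      fl.2.foldl (fun d label =>
        match d.get? label with
        | some s => d.insert label (PySem.Set.add s fl.1)          -- labels_dict[label].add(frame)
        | none   => d.insert label (PySem.Set.ofList [fl.1])) d)   -- labels_dict[label] = {frame}
    PySem.Dict.empty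

-- hand port of itertools.groupby(·, key = lambda x: x[0] - x[1]) (PySem has no groupby);
-- exact: groups maximal adjacent runs of equal key, in order; cur holds the current group reversed
def pvGroupByAux (k : Int) (cur : List (Int × Int)) : List (Int × Int) → List (List (Int × Int))
  | [] => [cur.reverse]
  | x :: xs =>
    if x.1 - x.2 = k then pvGroupByAux k (x :: cur) xs
    else cur.reverse :: pvGroupByAux (x.1 - x.2) [x] xs

def pvGroupBy : List (Int × Int) → List (List (Int × Int))
  | [] => []
  | x :: xs => pvGroupByAux (x.1 - x.2) [x] xs

-- [(t[0][1], t[-1][1]) for t in (tuple(g[1]) for g in groupby(enumerate(frame_list), …))]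
def pvIntervalsA (frame_list : List Int) : List (Int × Int) :=
  (pvGroupBy (PySem.List.enumerate frame_list 0)).map
    (fun g => ((PySem.List.pyGetD g 0 (0, 0)).2, (PySem.List.pyGetD g (-1) (0, 0)).2))

def labels_to_intervals (labels_list : List (List String)) : List (String × Int × Int) :=
  (pvBuildA labels_list).items.foldl
    (fun output kv =>
      let frame_list := PySem.List.sorted kv.2 (fun x => x) false
      (pvIntervalsA frame_list).foldl
        (fun output iv => PySem.Set.add output (kv.1, iv.1, iv.2 + 1)) output)
    PySem.Set.empty

-- ===== PORT B =====
-- state dict: label -> (closed intervals, open start, open prev); a gap closes the open interval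
def pvStateStep (f : Int) (d : PySem.Dict String (List (Int × Int) × Int × Int))
    (label : String) : PySem.Dict String (List (Int × Int) × Int × Int) :=
  match d.get? label with
  | none => d.insert label ([], f, f)                              -- state[label] = [[], frame, frame]
  | some st =>
    if f = st.2.2 then d                                           -- duplicate label in same frame
    else if f = st.2.2 + 1 then d.insert label (st.1, st.2.1, f)   -- st[2] = frame
    else d.insert label (st.1 ++ [(st.2.1, st.2.2 + 1)], f, f)     -- close, open new

def pvBuildState (labels_list : List (List String)) :
    PySem.Dict String (List (Int × Int) × Int × Int) :=
  (PySem.List.enumerate labels_list 0).foldl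
    (fun d fl => fl.2.foldl (pvStateStep fl.1) d) PySem.Dict.empty

def labels_to_intervals_alt (labels_list : List (List String)) : List (String × Int × Int) :=
  (pvBuildState labels_list).items.foldl
    (fun out kv =>
      PySem.Set.add
        (kv.2.1.foldl (fun o iv => PySem.Set.add o (kv.1, iv.1, iv.2)) out)
        (kv.1, kv.2.2.1, kv.2.2.2 + 1))
    PySem.Set.empty

-- ===== PRECONDITION & SPEC =====
def Spec_labels_to_intervals (labels_list : List (List String)) (out : List (String × Int × Int)) : Prop := out = labels_to_intervals_alt labels_list
instance (labels_list : List (List String)) (out : List (String × Int × Int)) : Decidable (Spec_labels_to_intervals labels_list out) := by unfold Spec_labels_to_intervals; infer_instance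

-- ===== CLAIM (what is proved, stated in full; the proofs are below) =====
def Claim_equal_labels_to_intervals : Prop := ∀ (labels_list : List (List String)), Dom_labels_to_intervals labels_list → Spec_labels_to_intervals labels_list (labels_to_intervals labels_list)

-- ===== LEMMAS AND PROOFS =====

-- the common characterisation: maximal runs of consecutive integers, as (start, last) pairs
def pvRunsAux (start prev : Int) : List Int → List (Int × Int)
  | [] => [(start, prev)]
  | f :: rest =>
    if f = prev + 1 then pvRunsAux start f rest
    else (start, prev) :: pvRunsAux f f rest

def pvRuns : List Int → List (Int × Int)
  | [] => []
  | f :: rest => pvRunsAux f f rest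

-- the per-label loop bodies of the two A-side building loops, named for the lemmas
def pvStepA (f : Int) (d : PySem.Dict String (List Int)) (label : String) :
    PySem.Dict String (List Int) :=
  match d.get? label with
  | some s => d.insert label (PySem.Set.add s f)
  | none   => d.insert label (PySem.Set.ofList [f])

-- proof-only reference: dict label -> ascending list of frames (append only if new)
def pvStepB (f : Int) (d : PySem.Dict String (List Int)) (label : String) :
    PySem.Dict String (List Int) :=
  match d.get? label with
  | none    => d.insert label [f]
  | some fs =>
    if PySem.List.pyGetD fs (-1) 0 ≠ f then d.insert label (fs ++ [f]) else d

def pvBuildRef (labels_list : List (List String)) : PySem.Dict String (List Int) :=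
  (PySem.List.enumerate labels_list 0).foldl
    (fun d fl => fl.2.foldl (pvStepB fl.1) d) PySem.Dict.empty

theorem pvBuildA_eq_foldl (ll : List (List String)) :
    pvBuildA ll = (PySem.List.enumerate ll 0).foldl
      (fun d fl => fl.2.foldl (pvStepA fl.1) d) PySem.Dict.empty := rfl

-- dict invariant: unique keys, every stored list nonempty, strictly increasing, elements ≤ f
def pvInvLe (f : Int) (d : PySem.Dict String (List Int)) : Prop :=
  d.keys.Nodup ∧ ∀ k v, d.get? k = some v → v ≠ [] ∧ v.Pairwise (· < ·) ∧ ∀ x ∈ v, x ≤ f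

theorem pv_map_id_of_not_mem (k : String) (v : List Int) :
    ∀ (l : List (String × List Int)), k ∉ l.map Prod.fst →
      l.map (fun p => if p.1 == k then (k, v) else p) = l := by
  intro l
  induction l with
  | nil => intro _; rfl
  | cons q t ih =>
    intro h
    simp only [List.map_cons, List.mem_cons] at h ⊢
    push Not at h
    rw [if_neg (by simpa using fun hq => h.1 hq.symm), ih h.2]

theorem pv_map_overwrite (k : String) (v : List Int) :
    ∀ (l : List (String × List Int)), (l.map Prod.fst).Nodup →
      (PySem.Dict.mk l).get? k = some v →
      l.map (fun p => if p.1 == k then (k, v) else p) = l := by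
  intro l
  induction l with
  | nil => intro _ _; rfl
  | cons p t ih =>
    intro hnd hget
    obtain ⟨k', v'⟩ := p
    rw [PySem.Dict.get?_mk_cons] at hget
    rw [List.map_cons] at hnd
    by_cases hk : (k' == k) = true
    · have hkk : k' = k := by simpa using hk
      rw [if_pos hk] at hget
      obtain rfl : v' = v := by simpa using hget
      subst hkk
      simp only [List.map_cons, hk, if_pos]
      rw [pv_map_id_of_not_mem _ _ t (by simpa using (List.nodup_cons.mp hnd).1)]
    · rw [if_neg hk] at hget
      simp only [List.map_cons, hk, if_neg, Bool.false_eq_true, not_false_iff]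
      rw [ih (List.nodup_cons.mp hnd).2 hget]

-- re-inserting the value a key already has does not change the dict
theorem pv_insert_self (d : PySem.Dict String (List Int)) (k : String) (v : List Int)
    (hnd : d.keys.Nodup) (h : d.get? k = some v) : d.insert k v = d := by
  apply PySem.Dict.ext
  rw [PySem.Dict.items_insert]
  have hc : d.contains k = true := by
    rw [PySem.Dict.contains_eq_isSome_get?, h]; rfl
  rw [if_pos hc]
  obtain ⟨l⟩ := d
  exact pv_map_overwrite k v l hnd h

theorem pv_last_max (v : List Int) (h : v ≠ []) (hp : v.Pairwise (· < ·)) :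
    ∀ x ∈ v, x ≤ v.getLast h := by
  intro x hx
  have hsplit : v.dropLast ++ [v.getLast h] = v := List.dropLast_concat_getLast h
  rw [← hsplit] at hp hx
  rcases List.mem_append.mp hx with hx' | hx'
  · exact le_of_lt ((List.pairwise_append.mp hp).2.2 x hx' _ (List.mem_singleton_self _))
  · exact le_of_eq (List.mem_singleton.mp hx')

theorem pv_stepA_eq_stepB (f : Int) (d : PySem.Dict String (List Int)) (label : String)
    (hinv : pvInvLe f d) :
    pvStepA f d label = pvStepB f d label ∧ pvInvLe f (pvStepB f d label) := by
  unfold pvStepA pvStepB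
  cases hd : d.get? label with
  | none =>
    dsimp only
    have hof : PySem.Set.ofList [f] = [f] := rfl
    refine ⟨by rw [hof], PySem.Dict.nodup_keys_insert d label [f] hinv.1, ?_⟩
    intro k v hv
    rw [PySem.Dict.get?_insert] at hv
    by_cases hk : k = label
    · rw [if_pos hk] at hv
      obtain rfl : [f] = v := by simpa using hv
      exact ⟨by simp, by simp, by simp⟩
    · rw [if_neg hk] at hv
      exact hinv.2 k v hv
  | some s =>
    dsimp only
    obtain ⟨hne, hpw, hle⟩ := hinv.2 label s hd
    have hlast : PySem.List.pyGetD s (-1) 0 = s.getLast hne := PySem.List.pyGetD_neg_one s 0 hne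
    by_cases hL : s.getLast hne = f
    · have hfs : f ∈ s := hL ▸ List.getLast_mem hne
      rw [if_neg (by rw [hlast]; simpa using hL)]
      rw [PySem.Set.add_of_mem hfs, pv_insert_self d label s hinv.1 hd]
      exact ⟨rfl, hinv⟩
    · have hfs : f ∉ s := fun hf =>
        hL (le_antisymm (hle _ (List.getLast_mem hne)) (pv_last_max s hne hpw f hf))
      rw [if_pos (by rw [hlast]; exact hL)]
      rw [PySem.Set.add_of_not_mem hfs]
      refine ⟨rfl, PySem.Dict.nodup_keys_insert d label (s ++ [f]) hinv.1, ?_⟩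
      intro k v hv
      rw [PySem.Dict.get?_insert] at hv
      by_cases hk : k = label
      · rw [if_pos hk] at hv
        obtain rfl : s ++ [f] = v := by simpa using hv
        refine ⟨by simp, ?_, ?_⟩
        · rw [List.pairwise_append]
          refine ⟨hpw, by simp, fun x hx y hy => ?_⟩
          obtain rfl : y = f := List.mem_singleton.mp hy
          exact lt_of_le_of_ne (hle x hx) (fun h => hfs (h ▸ hx))
        · intro x hx
          rcases List.mem_append.mp hx with hx' | hx'
          · exact hle x hx'
          · exact le_of_eq (List.mem_singleton.mp hx')
      · rw [if_neg hk] at hv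
        exact hinv.2 k v hv

theorem pv_inner_eq (f : Int) :
    ∀ (labels : List String) (d : PySem.Dict String (List Int)), pvInvLe f d →
      labels.foldl (pvStepA f) d = labels.foldl (pvStepB f) d ∧
      pvInvLe f (labels.foldl (pvStepB f) d) := by
  intro labels
  induction labels with
  | nil => intro d h; exact ⟨rfl, h⟩
  | cons l t ih =>
    intro d h
    obtain ⟨heq, hinv⟩ := pv_stepA_eq_stepB f d l h
    obtain ⟨heq2, hinv2⟩ := ih (pvStepB f d l) hinv
    simp only [List.foldl_cons]
    exact ⟨by rw [heq, heq2], hinv2⟩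

def pvInv (n : Int) (d : PySem.Dict String (List Int)) : Prop :=
  d.keys.Nodup ∧ ∀ k v, d.get? k = some v → v ≠ [] ∧ v.Pairwise (· < ·) ∧ ∀ x ∈ v, x < n

theorem pv_build_loop (ll : List (List String)) :
    ∀ (n : Int) (d : PySem.Dict String (List Int)), pvInv n d →
      (PySem.List.enumerate ll n).foldl (fun d fl => fl.2.foldl (pvStepA fl.1) d) d =
        (PySem.List.enumerate ll n).foldl (fun d fl => fl.2.foldl (pvStepB fl.1) d) d ∧
      pvInv (n + ll.length)
        ((PySem.List.enumerate ll n).foldl (fun d fl => fl.2.foldl (pvStepB fl.1) d) d) := by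
  induction ll with
  | nil =>
    intro n d h
    refine ⟨rfl, h.1, fun k v hv => ?_⟩
    obtain ⟨h1, h2, h3⟩ := h.2 k v hv
    exact ⟨h1, h2, fun x hx => lt_of_lt_of_le (h3 x hx) (by simp)⟩
  | cons labels t ih =>
    intro n d h
    rw [PySem.List.enumerate_cons]
    simp only [List.foldl_cons]
    have hle : pvInvLe n d :=
      ⟨h.1, fun k v hv =>
        let ⟨h1, h2, h3⟩ := h.2 k v hv
        ⟨h1, h2, fun x hx => le_of_lt (h3 x hx)⟩⟩
    obtain ⟨heq, hinv⟩ := pv_inner_eq n labels d hle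
    have hinv' : pvInv (n + 1) (labels.foldl (pvStepB n) d) :=
      ⟨hinv.1, fun k v hv =>
        let ⟨h1, h2, h3⟩ := hinv.2 k v hv
        ⟨h1, h2, fun x hx => lt_of_le_of_lt (h3 x hx) (by omega)⟩⟩
    obtain ⟨heq2, hinv2⟩ := ih (n + 1) _ hinv'
    refine ⟨by rw [heq, heq2], ?_⟩
    have : n + 1 + (t.length : Int) = n + (t.length + 1 : Nat) := by push_cast; ring
    rw [this] at hinv2
    simpa using hinv2

theorem pv_build_eq (ll : List (List String)) :
    pvBuildA ll = pvBuildRef ll ∧ pvInv ll.length (pvBuildRef ll) := by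
  have h0 : pvInv 0 PySem.Dict.empty := by
    constructor
    · simp [PySem.Dict.keys_empty]
    · intro k v hv; rw [PySem.Dict.get?_empty] at hv; cases hv
  obtain ⟨heq, hinv⟩ := pv_build_loop ll 0 PySem.Dict.empty h0
  rw [pvBuildA_eq_foldl]
  unfold pvBuildRef
  constructor
  · exact heq
  · simpa using hinv

-- first/last of a reversed group are the group's last/first elements
theorem pv_mapfn_reverse (cur : List (Int × Int)) (hc : cur ≠ []) :
    ((PySem.List.pyGetD cur.reverse 0 ((0 : Int), (0 : Int))).2,
     (PySem.List.pyGetD cur.reverse (-1) ((0 : Int), (0 : Int))).2) =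
    ((cur.getLast hc).2, (cur.head hc).2) := by
  have hrc : cur.reverse ≠ [] := by simpa using hc
  rw [PySem.List.pyGetD_neg_one cur.reverse ((0 : Int), (0 : Int)) hrc, List.getLast_reverse]
  rw [PySem.List.pyGetD_zero]
  congr 1
  rw [List.getD_eq_getElem?_getD, ← List.head?_eq_getElem?, List.head?_reverse,
    List.getLast?_eq_some_getLast hc]
  rfl

-- A's groupby pipeline computes the runs
theorem pv_groupAux (rest : List Int) :
    ∀ (i start prev : Int) (cur : List (Int × Int)) (hc : cur ≠ []),
      (cur.getLast hc).2 = start → (cur.head hc).2 = prev →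
      (pvGroupByAux ((i - 1) - prev) cur (PySem.List.enumerate rest i)).map
        (fun g => ((PySem.List.pyGetD g 0 (0, 0)).2, (PySem.List.pyGetD g (-1) (0, 0)).2)) =
      pvRunsAux start prev rest := by
  induction rest with
  | nil =>
    intro i start prev cur hc hlast hhead
    rw [PySem.List.enumerate_nil]
    simp only [pvGroupByAux, List.map_cons, List.map_nil, pvRunsAux]
    rw [pv_mapfn_reverse cur hc, hlast, hhead]
  | cons f t ih =>
    intro i start prev cur hc hlast hhead
    rw [PySem.List.enumerate_cons]
    simp only [pvGroupByAux]
    by_cases hf : f = prev + 1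
    · rw [if_pos (by omega)]
      have hkey : i - 1 - prev = (i + 1 - 1) - f := by omega
      rw [hkey]
      rw [ih (i + 1) start f ((i, f) :: cur) (by simp) (by
        rw [List.getLast_cons hc]; exact hlast) (by simp)]
      simp only [pvRunsAux, if_pos hf]
    · rw [if_neg (by omega)]
      simp only [List.map_cons]
      have hkey : i - f = (i + 1 - 1) - f := by omega
      rw [hkey]
      rw [ih (i + 1) f f [(i, f)] (by simp) (by simp) (by simp)]
      simp only [pvRunsAux, if_neg hf]
      congr 1
      rw [pv_mapfn_reverse cur hc, hlast, hhead]

theorem pv_intervalsA_eq_runs (fs : List Int) : pvIntervalsA fs = pvRuns fs := by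
  cases fs with
  | nil => rfl
  | cons f rest =>
    unfold pvIntervalsA pvRuns
    rw [PySem.List.enumerate_cons, pvGroupBy]
    have hkey : (0 : Int) - f = (1 - 1) - f := by ring
    simp only [hkey]
    exact pv_groupAux rest 1 f f [(0, f)] (by simp) (by simp) (by simp)

-- ===== the simulation between the reference dict and B's state dict =====

theorem pvRunsAux_ne_nil : ∀ (rest : List Int) (s p : Int), pvRunsAux s p rest ≠ [] := by
  intro rest
  induction rest with
  | nil => intro s p; simp [pvRunsAux]
  | cons x t ih =>
    intro s p
    simp only [pvRunsAux]
    by_cases hx : x = p + 1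
    · rw [if_pos hx]; exact ih s x
    · rw [if_neg hx]; simp

-- appending one element to the scanned list: extend the last run or open a new one
theorem pvRunsAux_snoc : ∀ (rest : List Int) (s p f : Int) (c : List (Int × Int)) (a L : Int),
    pvRunsAux s p rest = c ++ [(a, L)] →
    pvRunsAux s p (rest ++ [f]) =
      if f = L + 1 then c ++ [(a, f)] else (c ++ [(a, L)]) ++ [(f, f)] := by
  intro rest
  induction rest with
  | nil =>
    intro s p f c a L hr
    have hc : c = [] := by
      cases c with
      | nil => rfl
      | cons y c' =>
        have := congrArg List.length hr
        simp [pvRunsAux] at this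
    subst hc
    obtain ⟨ha, hL⟩ : s = a ∧ p = L := by simpa [pvRunsAux] using hr
    subst ha
    subst hL
    simp only [List.nil_append, pvRunsAux]
    split_ifs <;> simp
  | cons x t ih =>
    intro s p f c a L hr
    rw [List.cons_append]
    simp only [pvRunsAux] at hr ⊢
    by_cases hx : x = p + 1
    · rw [if_pos hx] at hr ⊢
      exact ih s x f c a L hr
    · rw [if_neg hx] at hr ⊢
      cases c with
      | nil =>
        have htail : pvRunsAux x x t = [] := by
          have := congrArg List.tail hr
          simpa using this
        exact absurd htail (pvRunsAux_ne_nil t x x)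
      | cons y c' =>
        rw [List.cons_append] at hr
        have hy : y = (s, p) := by
          have := congrArg (fun l => List.headD l (0, 0)) hr
          simpa using this.symm
        have htail : pvRunsAux x x t = c' ++ [(a, L)] := by
          have := congrArg List.tail hr
          simpa using this
        subst hy
        rw [ih x x f c' a L htail]
        by_cases hf : f = L + 1 <;> simp [hf]

-- the relation between a reference value (ascending frame list) and a B state value
def pvRel (fs : List Int) (st : List (Int × Int) × Int × Int) : Prop :=
  ∃ (c : List (Int × Int)) (hne : fs ≠ []),
    st.1 = c.map (fun p => (p.1, p.2 + 1)) ∧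
    pvRuns fs = c ++ [(st.2.1, st.2.2)] ∧
    fs.getLast hne = st.2.2

def pvQ (p : String × List Int) (q : String × (List (Int × Int) × Int × Int)) : Prop :=
  p.1 = q.1 ∧ pvRel p.2 q.2

theorem pvRel_singleton (f : Int) : pvRel [f] ([], f, f) :=
  ⟨[], by simp, rfl, rfl, rfl⟩

theorem pv_getLast_snoc (l : List Int) (f : Int) (h : l ++ [f] ≠ []) :
    (l ++ [f]).getLast h = f := by
  rw [List.getLast_append]
  rfl

theorem pvRel_snoc (fs : List Int) (st : List (Int × Int) × Int × Int) (f : Int)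
    (hrel : pvRel fs st) :
    pvRel (fs ++ [f])
      (if f = st.2.2 + 1 then (st.1, st.2.1, f)
       else (st.1 ++ [(st.2.1, st.2.2 + 1)], f, f)) := by
  obtain ⟨c, hne, hmap, hruns, hlast⟩ := hrel
  obtain ⟨f0, rest, rfl⟩ : ∃ f0 rest, fs = f0 :: rest := by
    cases fs with
    | nil => exact absurd rfl hne
    | cons f0 rest => exact ⟨f0, rest, rfl⟩
  have hsnoc := pvRunsAux_snoc rest f0 f0 f c st.2.1 st.2.2 hruns
  by_cases hf : f = st.2.2 + 1
  · rw [if_pos hf]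
    refine ⟨c, by simp, hmap, ?_, ?_⟩
    · show pvRunsAux f0 f0 (rest ++ [f]) = c ++ [(st.2.1, f)]
      rw [hsnoc, if_pos hf]
    · exact pv_getLast_snoc (f0 :: rest) f _
  · rw [if_neg hf]
    refine ⟨c ++ [(st.2.1, st.2.2)], by simp, ?_, ?_, ?_⟩
    · show st.1 ++ [(st.2.1, st.2.2 + 1)] =
        (c ++ [(st.2.1, st.2.2)]).map (fun p => (p.1, p.2 + 1))
      rw [List.map_append, ← hmap]; rfl
    · show pvRunsAux f0 f0 (rest ++ [f]) = (c ++ [(st.2.1, st.2.2)]) ++ [(f, f)]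
      rw [hsnoc, if_neg hf]
    · exact pv_getLast_snoc (f0 :: rest) f _

-- lookup correspondence through the simulation
theorem pv_sim_get? (k : String) :
    ∀ (l1 : List (String × List Int)) (l2 : List (String × (List (Int × Int) × Int × Int))),
      List.Forall₂ pvQ l1 l2 →
      ((PySem.Dict.mk l1).get? k = none ∧ (PySem.Dict.mk l2).get? k = none) ∨
      (∃ v w, (PySem.Dict.mk l1).get? k = some v ∧ (PySem.Dict.mk l2).get? k = some w ∧
        pvRel v w) := by
  intro l1
  induction l1 with
  | nil =>
    intro l2 h
    cases h
    left
    exact ⟨rfl, rfl⟩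
  | cons a t ih =>
    intro l2 h
    cases l2 with
    | nil => cases h
    | cons b t2 =>
      cases h with
      | cons hq htl =>
        obtain ⟨ka, va⟩ := a
        obtain ⟨kb, wb⟩ := b
        obtain ⟨hfst, hrel⟩ := hq
        obtain rfl : ka = kb := hfst
        rw [PySem.Dict.get?_mk_cons, PySem.Dict.get?_mk_cons]
        by_cases hk : (ka == k) = true
        · right
          exact ⟨va, wb, by rw [if_pos hk], by rw [if_pos hk], hrel⟩
        · rw [if_neg hk, if_neg hk]
          exact ih t2 htl

-- overwriting the same key with related values preserves the simulation
theorem pv_sim_overwrite (k : String) (v : List Int) (w : List (Int × Int) × Int × Int)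
    (hvw : pvRel v w) :
    ∀ (l1 : List (String × List Int)) (l2 : List (String × (List (Int × Int) × Int × Int))),
      List.Forall₂ pvQ l1 l2 →
      List.Forall₂ pvQ (l1.map (fun p => if p.1 == k then (k, v) else p))
        (l2.map (fun p => if p.1 == k then (k, w) else p)) := by
  intro l1
  induction l1 with
  | nil =>
    intro l2 h
    cases h
    exact List.Forall₂.nil
  | cons a t ih =>
    intro l2 h
    cases l2 with
    | nil => cases h
    | cons b t2 =>
      cases h with
      | cons hq htl =>
        obtain ⟨hfst, hrel⟩ := hq
        simp only [List.map_cons]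
        refine List.Forall₂.cons ?_ (ih t2 htl)
        by_cases hk : (a.1 == k) = true
        · rw [if_pos hk, if_pos (by rw [← hfst]; exact hk)]
          exact ⟨rfl, hvw⟩
        · rw [if_neg hk, if_neg (by rw [← hfst]; exact hk)]
          exact ⟨hfst, hrel⟩

theorem pv_sim_step (f : Int) (d1 : PySem.Dict String (List Int))
    (d2 : PySem.Dict String (List (Int × Int) × Int × Int)) (label : String)
    (hinv : pvInvLe f d1) (hsim : List.Forall₂ pvQ d1.items d2.items) :
    List.Forall₂ pvQ (pvStepB f d1 label).items (pvStateStep f d2 label).items := by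
  unfold pvStepB pvStateStep
  rcases pv_sim_get? label d1.items d2.items hsim with ⟨h1, h2⟩ | ⟨v, w, h1, h2, hrel⟩
  · rw [show d1.get? label = none from h1, show d2.get? label = none from h2]
    dsimp only
    have hc1 : d1.contains label = false := by
      rw [PySem.Dict.contains_eq_isSome_get?, h1]; rfl
    have hc2 : d2.contains label = false := by
      rw [PySem.Dict.contains_eq_isSome_get?, h2]; rfl
    rw [PySem.Dict.items_insert, if_neg (by simp [hc1]),
      PySem.Dict.items_insert, if_neg (by simp [hc2])]
    exact List.rel_append hsim
      (List.Forall₂.cons ⟨rfl, pvRel_singleton f⟩ List.Forall₂.nil)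
  · rw [show d1.get? label = some v from h1, show d2.get? label = some w from h2]
    dsimp only
    obtain ⟨hvne, hpw, hle⟩ := hinv.2 label v h1
    have hlastv : ∃ hne : v ≠ [], v.getLast hne = w.2.2 := by
      obtain ⟨c, hne, _, _, hl⟩ := hrel
      exact ⟨hne, hl⟩
    obtain ⟨hne, hlast⟩ := hlastv
    have hget : PySem.List.pyGetD v (-1) 0 = w.2.2 := by
      rw [PySem.List.pyGetD_neg_one v 0 hne, hlast]
    have hc1 : d1.contains label = true := by
      rw [PySem.Dict.contains_eq_isSome_get?, h1]; rfl
    have hc2 : d2.contains label = true := by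
      rw [PySem.Dict.contains_eq_isSome_get?, h2]; rfl
    by_cases hLf : f = w.2.2
    · rw [if_pos hLf, if_neg (by rw [hget]; omega)]
      exact hsim
    · rw [if_pos (by rw [hget]; omega)]
      have hrel' := pvRel_snoc v w f hrel
      by_cases hf1 : f = w.2.2 + 1
      · rw [if_neg hLf, if_pos hf1]
        rw [if_pos hf1] at hrel'
        rw [PySem.Dict.items_insert, if_pos hc1, PySem.Dict.items_insert, if_pos hc2]
        exact pv_sim_overwrite label (v ++ [f]) (w.1, w.2.1, f) hrel' d1.items d2.items hsim
      · rw [if_neg hLf, if_neg hf1]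
        rw [if_neg hf1] at hrel'
        rw [PySem.Dict.items_insert, if_pos hc1, PySem.Dict.items_insert, if_pos hc2]
        exact pv_sim_overwrite label (v ++ [f]) (w.1 ++ [(w.2.1, w.2.2 + 1)], f, f)
          hrel' d1.items d2.items hsim

theorem pv_sim_inner (f : Int) :
    ∀ (labels : List String) (d1 : PySem.Dict String (List Int))
      (d2 : PySem.Dict String (List (Int × Int) × Int × Int)),
      pvInvLe f d1 → List.Forall₂ pvQ d1.items d2.items →
      List.Forall₂ pvQ ((labels.foldl (pvStepB f) d1).items)
        ((labels.foldl (pvStateStep f) d2).items) := by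
  intro labels
  induction labels with
  | nil => intro d1 d2 _ hsim; exact hsim
  | cons l t ih =>
    intro d1 d2 hinv hsim
    simp only [List.foldl_cons]
    exact ih (pvStepB f d1 l) (pvStateStep f d2 l)
      (pv_stepA_eq_stepB f d1 l hinv).2 (pv_sim_step f d1 d2 l hinv hsim)

theorem pv_sim_loop (ll : List (List String)) :
    ∀ (n : Int) (d1 : PySem.Dict String (List Int))
      (d2 : PySem.Dict String (List (Int × Int) × Int × Int)),
      pvInv n d1 → List.Forall₂ pvQ d1.items d2.items →
      List.Forall₂ pvQ
        (((PySem.List.enumerate ll n).foldl (fun d fl => fl.2.foldl (pvStepB fl.1) d) d1).items)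
        (((PySem.List.enumerate ll n).foldl (fun d fl => fl.2.foldl (pvStateStep fl.1) d) d2).items) := by
  induction ll with
  | nil => intro n d1 d2 _ hsim; exact hsim
  | cons labels t ih =>
    intro n d1 d2 h hsim
    rw [PySem.List.enumerate_cons]
    simp only [List.foldl_cons]
    have hle : pvInvLe n d1 :=
      ⟨h.1, fun k v hv =>
        let ⟨h1, h2, h3⟩ := h.2 k v hv
        ⟨h1, h2, fun x hx => le_of_lt (h3 x hx)⟩⟩
    have hinv : pvInvLe n (labels.foldl (pvStepB n) d1) := (pv_inner_eq n labels d1 hle).2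
    have hinv' : pvInv (n + 1) (labels.foldl (pvStepB n) d1) :=
      ⟨hinv.1, fun k v hv =>
        let ⟨h1, h2, h3⟩ := hinv.2 k v hv
        ⟨h1, h2, fun x hx => lt_of_le_of_lt (h3 x hx) (by omega)⟩⟩
    exact ih (n + 1) _ _ hinv' (pv_sim_inner n labels d1 d2 hle hsim)

theorem pv_sim (ll : List (List String)) :
    List.Forall₂ pvQ (pvBuildRef ll).items (pvBuildState ll).items := by
  have h0 : pvInv 0 PySem.Dict.empty := by
    constructor
    · simp [PySem.Dict.keys_empty]
    · intro k v hv; rw [PySem.Dict.get?_empty] at hv; cases hv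
  exact pv_sim_loop ll 0 PySem.Dict.empty PySem.Dict.empty h0 List.Forall₂.nil

-- folding related items lists with per-item equal emitters gives equal results
theorem pv_foldl_sim {α : Type}
    (emit1 : α → (String × List Int) → α)
    (emit2 : α → (String × (List (Int × Int) × Int × Int)) → α) :
    ∀ (l1 : List (String × List Int)) (l2 : List (String × (List (Int × Int) × Int × Int))),
      List.Forall₂ pvQ l1 l2 →
      (∀ p ∈ l1, ∀ q, pvQ p q → ∀ acc, emit1 acc p = emit2 acc q) →
      ∀ init, l1.foldl emit1 init = l2.foldl emit2 init := by
  intro l1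
  induction l1 with
  | nil =>
    intro l2 h _ init
    cases h
    rfl
  | cons a t ih =>
    intro l2 h hemit init
    cases l2 with
    | nil => cases h
    | cons b t2 =>
      cases h with
      | cons hq htl =>
        simp only [List.foldl_cons]
        rw [hemit a (by simp) b hq init]
        exact ih t2 htl (fun p hp q hq' acc => hemit p (by simp [hp]) q hq' acc) _

-- ===== VERDICT (by name: the statement is the Claim_ definition above) =====
theorem labels_to_intervals_spec : Claim_equal_labels_to_intervals := by
  intro ll _
  unfold Spec_labels_to_intervals
  obtain ⟨heq, hnd, hinv⟩ := pv_build_eq ll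
  unfold labels_to_intervals labels_to_intervals_alt
  rw [heq]
  apply pv_foldl_sim _ _ (pvBuildRef ll).items (pvBuildState ll).items (pv_sim ll)
  intro p hp q hq acc
  obtain ⟨k, v⟩ := p
  obtain ⟨k2, w⟩ := q
  obtain ⟨hfst, hrel⟩ := hq
  obtain rfl : k = k2 := hfst
  have hget : (pvBuildRef ll).get? k = some v :=
    PySem.Dict.get?_of_mem_items (pvBuildRef ll) hp hnd
  obtain ⟨hvne, hpw, _⟩ := hinv k v hget
  have hsorted : PySem.List.sorted v (fun x => x) false = v :=
    PySem.List.sorted_eq_self_of_pairwise v (fun x => x) (hpw.imp le_of_lt)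
  obtain ⟨c, hne, hmap, hruns, hlast⟩ := hrel
  dsimp only
  rw [hsorted, pv_intervalsA_eq_runs, hruns, hmap]
  rw [List.foldl_append, List.foldl_map]
  rfl
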